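-- pv_equiv track=rewrite | github.com/mam288/bioinformatics-VI | wk3_02_multiple_pattern_matching.py | generate_suffixes_tuples
-- ===== SOURCE A (Python) =====
-- def generate_suffixes_tuples(pattern):
--     '''
--     Generates all of the suffixes of pattern.
--     '''
--     suffixes = []
--     index = 0
--     while pattern != '':
--         suffixes.append((pattern,index))
--         index += 1
--         pattern = pattern[1:]
--     return suffixes
-- ===== SOURCE B (Python) =====
-- def generate_suffixes_tuples(pattern):
--     '''
--     Generates all of the suffixes of pattern.
--     '''
--     out = []
--     cur = ''
--     i = len(pattern)
--     for ch in reversed(pattern):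
--         i -= 1
--         cur = ch + cur
--         out.append((cur, i))
--     out.reverse()
--     return out
-- ===== Notes on version B (the rewrite author's own statement) =====
-- stated objective: alternative
-- what changed: B builds each suffix right-to-left by prepending one character to a growing accumulator (collecting then reversing the list), instead of A's while-loop that repeatedly front-slices the remaining pattern and counts the index up.
import Mathlib
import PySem

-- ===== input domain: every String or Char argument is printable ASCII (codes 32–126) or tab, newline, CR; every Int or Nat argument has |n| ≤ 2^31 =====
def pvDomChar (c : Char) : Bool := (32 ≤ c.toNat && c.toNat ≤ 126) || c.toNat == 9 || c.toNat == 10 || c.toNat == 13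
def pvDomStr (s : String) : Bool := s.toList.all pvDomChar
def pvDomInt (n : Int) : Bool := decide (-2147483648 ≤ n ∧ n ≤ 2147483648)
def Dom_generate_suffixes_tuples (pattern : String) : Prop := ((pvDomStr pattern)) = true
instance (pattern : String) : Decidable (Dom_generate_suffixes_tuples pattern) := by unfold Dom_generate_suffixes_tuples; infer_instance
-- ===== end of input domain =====

-- B builds each suffix right-to-left by prepending a character to an accumulator, instead of A's repeated front-slicing; equivalence proved for all strings.

-- ===== PORT A =====
-- while pattern != '': append (pattern, index); index += 1; pattern = pattern[1:]
def pvGoA : List Char → Int → List (String × Int)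
  | [], _ => []
  | c :: cs, i => (String.mk (c :: cs), i) :: pvGoA cs (i + 1)

def generate_suffixes_tuples (pattern : String) : List (String × Int) :=
  pvGoA pattern.toList 0

-- ===== PORT B =====
-- for ch in reversed(pattern): i -= 1; cur = ch + cur; out.append((cur, i));  out.reverse()
def pvStepB (st : Int × List Char × List (String × Int)) (ch : Char) :
    Int × List Char × List (String × Int) :=
  let i := st.1 - 1
  let cur := ch :: st.2.1
  (i, cur, st.2.2 ++ [(String.mk cur, i)])

def generate_suffixes_tuples_alt (pattern : String) : List (String × Int) :=
  (pattern.toList.reverse.foldl pvStepB ((pattern.toList.length : Int), [], [])).2.2.reverse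

-- ===== PRECONDITION & SPEC =====
def Spec_generate_suffixes_tuples (pattern : String) (out : List (String × Int)) : Prop := out = generate_suffixes_tuples_alt pattern
instance (pattern : String) (out : List (String × Int)) : Decidable (Spec_generate_suffixes_tuples pattern out) := by unfold Spec_generate_suffixes_tuples; infer_instance

-- ===== CLAIM (what is proved, stated in full; the proofs are below) =====
def Claim_equal_generate_suffixes_tuples : Prop := ∀ (pattern : String), Dom_generate_suffixes_tuples pattern → Spec_generate_suffixes_tuples pattern (generate_suffixes_tuples pattern)

-- ===== LEMMAS AND PROOFS =====
-- loop invariant of B's fold: after consuming l.reverse it holds (i, l, acc ++ (pvGoA l i).reverse)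
theorem pvFoldB_inv (l : List Char) (i : Int) (acc : List (String × Int)) :
    l.reverse.foldl pvStepB (i + l.length, [], acc) = (i, l, acc ++ (pvGoA l i).reverse) := by
  induction l generalizing i acc with
  | nil => simp [pvGoA]
  | cons c cs ih =>
      have h : (i : Int) + (c :: cs).length = (i + 1) + cs.length := by
        simp; ring
      simp only [List.reverse_cons, List.foldl_append, h, ih (i + 1) acc]
      simp [pvStepB, pvGoA]

theorem generate_suffixes_tuples_spec : Claim_equal_generate_suffixes_tuples := by
  intro pattern _
  unfold Spec_generate_suffixes_tuples generate_suffixes_tuples generate_suffixes_tuples_alt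
  have h := pvFoldB_inv pattern.toList 0 []
  rw [show ((pattern.toList.length : Int)) = 0 + pattern.toList.length by ring, h]
  simp
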